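-- pv_equiv track=rewrite | github.com/Constyk20/traffic-backend | iot_simulator.py | get_current_traffic_pattern
-- ===== SOURCE A (Python) =====
-- from typing import Dict, List, Tuple
--
-- TRAFFIC_PATTERNS = {
--     'early_morning': {'range': (5, 7), 'vehicles': (20, 60)},      # 5 AM - 7 AM
--     'morning_peak': {'range': (7, 10), 'vehicles': (80, 200)},     # 7 AM - 10 AM
--     'midday': {'range': (10, 13), 'vehicles': (40, 120)},          # 10 AM - 1 PM
--     'afternoon_peak': {'range': (13, 16), 'vehicles': (70, 180)},  # 1 PM - 4 PM
--     'evening': {'range': (16, 19), 'vehicles': (50, 140)},         # 4 PM - 7 PM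
--     'night': {'range': (19, 5), 'vehicles': (10, 50)}              # 7 PM - 5 AM
-- }
--
-- def get_current_traffic_pattern(hour: int) -> Tuple[int, int]:
--     """Get vehicle range based on current time and traffic patterns."""
--     for pattern_name, pattern in TRAFFIC_PATTERNS.items():
--         start, end = pattern['range']
--         if start < end:
--             if start <= hour < end:
--                 return pattern['vehicles']
--         else:  # Overnight range (e.g., 19-5)
--             if hour >= start or hour < end:
--                 return pattern['vehicles']
--     # Default to night pattern if no match found
--     return TRAFFIC_PATTERNS['night']['vehicles']
-- ===== SOURCE B (Python) =====
-- # B: precompute an hour -> vehicles table once at module load; lookup is O(1) with the night default.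
-- TRAFFIC_PATTERNS = {
--     'early_morning': {'range': (5, 7), 'vehicles': (20, 60)},
--     'morning_peak': {'range': (7, 10), 'vehicles': (80, 200)},
--     'midday': {'range': (10, 13), 'vehicles': (40, 120)},
--     'afternoon_peak': {'range': (13, 16), 'vehicles': (70, 180)},
--     'evening': {'range': (16, 19), 'vehicles': (50, 140)},
--     'night': {'range': (19, 5), 'vehicles': (10, 50)}
-- }
--
-- HOUR_TO_VEHICLES = {}
-- for _p in TRAFFIC_PATTERNS.values():
--     _s, _e = _p['range']
--     _hours = range(_s, _e) if _s < _e else list(range(_s, 24)) + list(range(0, _e))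
--     for _h in _hours:
--         HOUR_TO_VEHICLES[_h] = _p['vehicles']
--
-- def get_current_traffic_pattern(hour):
--     """Get vehicle range based on current time and traffic patterns."""
--     return HOUR_TO_VEHICLES.get(hour, TRAFFIC_PATTERNS['night']['vehicles'])
-- ===== Notes on version B (the rewrite author's own statement) =====
-- stated objective: idiomatic
-- what changed: B precomputes an hour->vehicles lookup table once at module load (expanding each pattern's range, including the overnight wrap) and answers each call by a single dict lookup with the night default, instead of A's per-call scan over the patterns with interval tests.
import Mathlib
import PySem

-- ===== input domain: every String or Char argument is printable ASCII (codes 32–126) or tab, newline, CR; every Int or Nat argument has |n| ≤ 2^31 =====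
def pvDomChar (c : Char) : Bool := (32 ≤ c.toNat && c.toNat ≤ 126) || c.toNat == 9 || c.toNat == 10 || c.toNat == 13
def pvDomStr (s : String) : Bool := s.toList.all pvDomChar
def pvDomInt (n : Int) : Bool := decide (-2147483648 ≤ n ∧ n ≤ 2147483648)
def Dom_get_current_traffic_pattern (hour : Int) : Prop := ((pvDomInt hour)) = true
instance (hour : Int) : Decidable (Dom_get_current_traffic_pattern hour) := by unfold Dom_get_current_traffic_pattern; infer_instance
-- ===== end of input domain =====

-- B replaces A's per-call scan over the pattern ranges by a table keyed by hour, built once, with the night default (idiomatic/alternative; same cost at this size).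

-- ===== PORT A =====
-- TRAFFIC_PATTERNS as an ordered list of (name, (range, vehicles)); iteration order = insertion order.
def pvPatterns : List (String × ((Int × Int) × (Int × Int))) :=
  [("early_morning", ((5, 7), (20, 60))),
   ("morning_peak", ((7, 10), (80, 200))),
   ("midday", ((10, 13), (40, 120))),
   ("afternoon_peak", ((13, 16), (70, 180))),
   ("evening", ((16, 19), (50, 140))),
   ("night", ((19, 5), (10, 50)))]

-- the for-loop with early return, as structural recursion over the pattern list
def pvScan (hour : Int) : List (String × ((Int × Int) × (Int × Int))) → Int × Int
  | [] => (10, 50)   -- default: TRAFFIC_PATTERNS['night']['vehicles']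
  | (_, ((s, e), v)) :: rest =>
      if s < e then
        if s ≤ hour ∧ hour < e then v else pvScan hour rest
      else
        if hour ≥ s ∨ hour < e then v else pvScan hour rest

def get_current_traffic_pattern (hour : Int) : Int × Int := pvScan hour pvPatterns

-- ===== PORT B =====
-- the module-load loop of Source B: for each pattern, enumerate its hours and insert its vehicles
def pvTable : PySem.Dict Int (Int × Int) :=
  pvPatterns.foldl
    (fun d p =>
      let s := p.2.1.1
      let e := p.2.1.2
      let hours := if s < e then PySem.List.pyRange s e 1
                   else PySem.List.pyRange s 24 1 ++ PySem.List.pyRange 0 e 1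
      hours.foldl (fun d h => d.insert h p.2.2) d)
    PySem.Dict.empty

def get_current_traffic_pattern_alt (hour : Int) : Int × Int :=
  pvTable.getD hour (10, 50)

-- ===== PRECONDITION & SPEC =====
def Spec_get_current_traffic_pattern (hour : Int) (out : Int × Int) : Prop := out = get_current_traffic_pattern_alt hour
instance (hour : Int) (out : Int × Int) : Decidable (Spec_get_current_traffic_pattern hour out) := by unfold Spec_get_current_traffic_pattern; infer_instance

-- ===== CLAIM (what is proved, stated in full; the proofs are below) =====
def Claim_equal_get_current_traffic_pattern : Prop := ∀ (hour : Int), Dom_get_current_traffic_pattern hour → Spec_get_current_traffic_pattern hour (get_current_traffic_pattern hour)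

-- ===== LEMMAS AND PROOFS =====

-- pvTable evaluated: the 24-entry literal dict (kernel computation)
theorem pvTable_eq : pvTable = PySem.Dict.mk
    [(5, (20, 60)), (6, (20, 60)),
     (7, (80, 200)), (8, (80, 200)), (9, (80, 200)),
     (10, (40, 120)), (11, (40, 120)), (12, (40, 120)),
     (13, (70, 180)), (14, (70, 180)), (15, (70, 180)),
     (16, (50, 140)), (17, (50, 140)), (18, (50, 140)),
     (19, (10, 50)), (20, (10, 50)), (21, (10, 50)), (22, (10, 50)), (23, (10, 50)),
     (0, (10, 50)), (1, (10, 50)), (2, (10, 50)), (3, (10, 50)), (4, (10, 50))] := by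
  decide

-- one step of A's loop, by definitional reduction
theorem pvScan_cons (hour s e : Int) (v : Int × Int) (n : String)
    (rest : List (String × ((Int × Int) × (Int × Int)))) :
    pvScan hour ((n, ((s, e), v)) :: rest) =
      if s < e then (if s ≤ hour ∧ hour < e then v else pvScan hour rest)
      else (if hour ≥ s ∨ hour < e then v else pvScan hour rest) := rfl

-- a key absent from a literal dict: getD returns the default
theorem getD_mk_not_mem (hour : Int) (d0 : Int × Int) :
    ∀ l : List (Int × (Int × Int)), (∀ p ∈ l, p.1 ≠ hour) → (PySem.Dict.mk l).getD hour d0 = d0 := by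
  intro l
  induction l with
  | nil => intro _; rfl
  | cons p rest ih =>
    intro h
    obtain ⟨k, v⟩ := p
    have hk : k ≠ hour := h (k, v) (List.mem_cons_self ..)
    simp only [PySem.Dict.getD, PySem.Dict.get?_mk_cons, beq_iff_eq, if_neg hk]
    have := ih (fun p hp => h p (List.mem_cons_of_mem _ hp))
    simpa [PySem.Dict.getD] using this

-- outside 0..23 both sides return the night vehicles (A via the overnight branch, B via the default)
theorem out_of_range (hour : Int) (h : hour < 0 ∨ 24 ≤ hour) :
    get_current_traffic_pattern hour = (10, 50) ∧ get_current_traffic_pattern_alt hour = (10, 50) := by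
  constructor
  · show pvScan hour pvPatterns = (10, 50)
    rw [pvPatterns]
    rw [pvScan_cons, if_pos (by norm_num : (5:Int) < 7),
        if_neg (by omega : ¬((5:Int) ≤ hour ∧ hour < 7))]
    rw [pvScan_cons, if_pos (by norm_num : (7:Int) < 10),
        if_neg (by omega : ¬((7:Int) ≤ hour ∧ hour < 10))]
    rw [pvScan_cons, if_pos (by norm_num : (10:Int) < 13),
        if_neg (by omega : ¬((10:Int) ≤ hour ∧ hour < 13))]
    rw [pvScan_cons, if_pos (by norm_num : (13:Int) < 16),
        if_neg (by omega : ¬((13:Int) ≤ hour ∧ hour < 16))]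
    rw [pvScan_cons, if_pos (by norm_num : (16:Int) < 19),
        if_neg (by omega : ¬((16:Int) ≤ hour ∧ hour < 19))]
    rw [pvScan_cons, if_neg (by norm_num : ¬((19:Int) < 5)),
        if_pos (by omega : hour ≥ 19 ∨ hour < (5:Int))]
  · show pvTable.getD hour (10, 50) = (10, 50)
    rw [pvTable_eq]
    apply getD_mk_not_mem
    intro p hp
    fin_cases hp <;> simp <;> omega

-- ===== VERDICT (by name: the statement is the Claim_ definition above) =====
theorem get_current_traffic_pattern_spec : Claim_equal_get_current_traffic_pattern := by
  intro hour _
  unfold Spec_get_current_traffic_pattern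
  by_cases h : 0 ≤ hour ∧ hour < 24
  · obtain ⟨h0, h1⟩ := h
    interval_cases hour <;> decide
  · obtain ⟨ha, hb⟩ := out_of_range hour (by omega)
    rw [ha, hb]
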